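-- pv_equiv track=rewrite | github.com/5a6io/BaekjoonProgrammers | 프로그래머스/2/86971. 전력망을 둘로 나누기/전력망을 둘로 나누기.py | bfs
-- ===== SOURCE A (Python) =====
-- from collections import deque
--
-- def bfs(cut, n, wires):
--     tower = [[] for _ in range(n + 1)]
--     visit = [False] * (n + 1)
--     q = deque()
--
--     for i in range(len(wires)):
--         if i == cut:
--             continue
--         v1, v2 = wires[i]
--         tower[v1].append(v2)
--         tower[v2].append(v1)
--
--     q.appendleft(1)
--     visit[1] = True
--     while q:
--         cur = q.pop()
--         for v in tower[cur]:
--             if not visit[v]: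
--                 visit[v] = True
--                 q.appendleft(v)
--
--     net1 = 0
--     net2 = 0
--
--     for i in range(1, n + 1):
--         if visit[i]:
--             net1 += 1
--         else:
--             net2 += 1
--
--     return abs(net1 - net2)
-- ===== SOURCE B (Python) =====
-- def bfs(cut, n, wires):
--     # Label propagation over the raw edge list instead of adjacency-list BFS:
--     # start from node 1 and repeatedly sweep the (non-cut) wires, marking both
--     # endpoints of any wire that touches a marked node, until a sweep changes
--     # nothing (at most n sweeps are ever needed).
--     edges = [w for i, w in enumerate(wires) if i != cut]
--     visit = [False] * (n + 1)
--     visit[1] = True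
--     for _ in range(n):
--         changed = False
--         for v1, v2 in edges:
--             if visit[v1] != visit[v2]:
--                 visit[v1] = visit[v2] = True
--                 changed = True
--         if not changed:
--             break
--     s = sum(visit[1:])
--     return abs(2 * s - n)
-- ===== Notes on version B (the rewrite author's own statement) =====
-- stated objective: simpler
-- what changed: A builds adjacency lists and runs a deque-based BFS from node 1; B instead repeatedly sweeps the raw (non-cut) wire list, marking both endpoints of any wire touching a marked node until a sweep changes nothing, then returns abs(2*sum(visit[1:]) - n).
import Mathlib
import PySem

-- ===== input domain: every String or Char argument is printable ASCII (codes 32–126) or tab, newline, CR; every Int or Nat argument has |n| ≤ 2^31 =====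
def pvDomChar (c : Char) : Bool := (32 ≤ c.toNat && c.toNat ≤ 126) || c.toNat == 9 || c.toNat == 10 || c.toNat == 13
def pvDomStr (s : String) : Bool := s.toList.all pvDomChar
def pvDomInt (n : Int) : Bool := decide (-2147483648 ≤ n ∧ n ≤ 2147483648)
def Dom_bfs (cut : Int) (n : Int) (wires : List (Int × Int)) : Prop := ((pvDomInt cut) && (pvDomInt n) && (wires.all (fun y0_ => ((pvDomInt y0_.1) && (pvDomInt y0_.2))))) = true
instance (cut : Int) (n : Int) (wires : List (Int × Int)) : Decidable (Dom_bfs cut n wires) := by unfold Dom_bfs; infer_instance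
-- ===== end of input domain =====

-- B replaces A's adjacency-list BFS (deque) by a label-propagation fixpoint over the raw wire list (objective: simpler, not faster).

-- ===== PORT A =====
-- Termination layer for bfsLoop (cited by name in its decreasing_by): pj is the normalized
-- (Python-wrapped) index of an in-range index, and each BFS iteration strictly decreases
-- 2 * (#unvisited) + (queue length).

-- normalized index of an in-range Python index (xs[v] reads cell pj xs.length v)
def pj (L : Nat) (v : Int) : Nat := (v.emod L).toNat

theorem emod_inRange {L : Nat} {v : Int} (h1 : -(L:Int) ≤ v) (h2 : v < L) :
    v % (L:Int) = if 0 ≤ v then v else v + L := by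
  split_ifs with h
  · exact Int.emod_eq_of_lt h h2
  · have e1 : (v + (L:Int) * 1) % (L:Int) = v % L := Int.add_mul_emod_self_left v (L:Int) 1
    have e2 : (v + (L:Int) * 1) % (L:Int) = v + (L:Int) * 1 :=
      Int.emod_eq_of_lt (by omega) (by omega)
    omega

theorem pj_eq {L : Nat} {v : Int} (h : PySem.Raise.InRange L v) :
    (pj L v : Int) = if 0 ≤ v then v else v + L := by
  obtain ⟨h1, h2⟩ := h
  unfold pj
  rw [show v.emod (L:Nat) = v % (L:Int) from rfl, emod_inRange h1 h2]
  split_ifs <;> omega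

theorem pyIdx?_inRange {L : Nat} {v : Int} (h : PySem.Raise.InRange L v) :
    PySem.List.pyIdx? L v = some (pj L v) := by
  have hj := pj_eq h
  obtain ⟨h1, h2⟩ := h
  unfold PySem.List.pyIdx?
  split_ifs at hj ⊢ <;> first | omega | (congr 1; omega)

theorem pyGet?_inRange {α : Type} {xs : List α} {v : Int} (h : PySem.Raise.InRange xs.length v) :
    PySem.List.pyGet? xs v = xs[pj xs.length v]? := by
  simp [PySem.List.pyGet?, pyIdx?_inRange h]

theorem pySetD_inRange {α : Type} {xs : List α} {v : Int} (h : PySem.Raise.InRange xs.length v) (y : α) :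
    PySem.List.pySetD xs v y = xs.set (pj xs.length v) y := by
  simp [PySem.List.pySetD, PySem.List.pySet?, pyIdx?_inRange h]

theorem inRange_of_pyGet?_some {α : Type} {xs : List α} {v : Int} {x : α}
    (h : PySem.List.pyGet? xs v = some x) : PySem.Raise.InRange xs.length v := by
  by_contra hc
  rw [← PySem.List.pyGet?_eq_none_iff] at hc
  simp [hc] at h

theorem count_false_set {xs : List Bool} {j : Nat} (h : xs[j]? = some false) :
    (xs.set j true).count false + 1 = xs.count false := by
  induction xs generalizing j with
  | nil => simp at h
  | cons a t ih =>
    cases j with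
    | zero => simp_all [List.count_cons]
    | succ m =>
      simp only [List.getElem?_cons_succ] at h
      have := ih h
      simp only [List.set_cons_succ, List.count_cons]
      omega

-- tower[v1].append(v2); tower[v2].append(v1)  (the 'none' branches are where Python raises IndexError; excluded by Pre_)
def towerStep (cut : Int) (tower : List (List Int)) (p : Int × (Int × Int)) : List (List Int) :=
  if p.1 = cut then tower
  else
    match PySem.List.pyGet? tower p.2.1 with
    | none => tower
    | some l1 =>
      let t1 := PySem.List.pySetD tower p.2.1 (l1 ++ [p.2.2])
      match PySem.List.pyGet? t1 p.2.2 with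
      | none => t1
      | some l2 => PySem.List.pySetD t1 p.2.2 (l2 ++ [p.2.1])

-- 'for i in range(len(wires)): … v1, v2 = wires[i] …' as a fold over the enumerated list
def buildTower (cut : Int) (L : Nat) (wires : List (Int × Int)) : List (List Int) :=
  (PySem.List.enumerate wires 0).foldl (towerStep cut) (List.replicate L [])

-- 'for v in tower[cur]: if not visit[v]: visit[v] = True; q.appendleft(v)'
-- queue representation: head of the Lean list = right end of the deque (what q.pop() removes),
-- so q.appendleft(v) appends at the Lean-list tail.
def nbrFold (visit : List Bool) (q : List Int) (nbrs : List Int) : List Bool × List Int :=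
  nbrs.foldl (fun s v =>
    match PySem.List.pyGet? s.1 v with
    | some false => (PySem.List.pySetD s.1 v true, s.2 ++ [v])
    | _ => s) (visit, q)

theorem nbrFold_measure (nbrs : List Int) (visit : List Bool) (q : List Int) :
    2 * (nbrFold visit q nbrs).1.count false + (nbrFold visit q nbrs).2.length ≤
      2 * visit.count false + q.length := by
  induction nbrs generalizing visit q with
  | nil => simp [nbrFold]
  | cons v t ih =>
    show 2 * (nbrFold _ _ (v :: t)).1.count false + _ ≤ _
    rw [nbrFold, List.foldl_cons]
    cases hg : PySem.List.pyGet? visit v with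
    | none => exact ih visit q
    | some b =>
      cases b with
      | true => exact ih visit q
      | false =>
        have hr := inRange_of_pyGet?_some hg
        rw [pyGet?_inRange hr] at hg
        have hc := count_false_set hg
        have := ih (PySem.List.pySetD visit v true) (q ++ [v])
        rw [pySetD_inRange hr] at this ⊢
        simp only [nbrFold] at this ⊢
        simp only [List.length_append, List.length_cons, List.length_nil] at this ⊢
        omega

-- the 'while q:' loop
def bfsLoop (tower : List (List Int)) (visit : List Bool) (q : List Int) : List Bool :=
  match q with
  | [] => visit
  | cur :: rest =>
    let nbrs := (PySem.List.pyGet? tower cur).getD []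
    let s := nbrFold visit rest nbrs
    bfsLoop tower s.1 s.2
termination_by 2 * visit.count false + q.length
decreasing_by
  have h := nbrFold_measure ((PySem.List.pyGet? tower cur).getD []) visit rest
  simp only [List.length_cons]
  omega

def bfs (cut : Int) (n : Int) (wires : List (Int × Int)) : Int :=
  let tower := buildTower cut (n + 1).toNat wires
  let visit0 := List.replicate (n + 1).toNat false
  -- q.appendleft(1); visit[1] = True  (visit[1] raises IndexError when n < 1; excluded by Pre_)
  let visit1 := PySem.List.pySetD visit0 1 true
  let visitF := bfsLoop tower visit1 [1]
  -- for i in range(1, n+1): tally visited / unvisited  (the 'none' branch is unreachable under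
  -- Pre_; the list is turned into an Array so that visit[i] is O(1), as it is on a Python list)
  let va := visitF.toArray
  let counts := (PySem.List.pyRange 1 (n + 1) 1).foldl
    (fun (p : Int × Int) i =>
      match (PySem.List.pyIdx? va.size i).bind (fun k => va[k]?) with
      | some true => (p.1 + 1, p.2)
      | some false => (p.1, p.2 + 1)
      | none => p) (0, 0)
  ((counts.1 - counts.2).natAbs : Int)

-- ===== PORT B =====

-- 'if visit[v1] != visit[v2]: visit[v1] = visit[v2] = True; changed = True'
-- (the 'none' branches are where Python raises IndexError; excluded by Pre_)
def passStep (s : List Bool × Bool) (e : Int × Int) : List Bool × Bool :=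
  match PySem.List.pyGet? s.1 e.1, PySem.List.pyGet? s.1 e.2 with
  | some b1, some b2 =>
    if b1 != b2 then (PySem.List.pySetD (PySem.List.pySetD s.1 e.1 true) e.2 true, true) else s
  | _, _ => s

-- one sweep over the edge list, returning (visit, changed)
def passB (E : List (Int × Int)) (visit : List Bool) : List Bool × Bool :=
  E.foldl passStep (visit, false)

-- 'for _ in range(n): … ; if not changed: break'
def loopB (E : List (Int × Int)) : Nat → List Bool → List Bool
  | 0, visit => visit
  | k + 1, visit =>
    let s := passB E visit
    if s.2 then loopB E k s.1 else s.1

def bfs_alt (cut : Int) (n : Int) (wires : List (Int × Int)) : Int :=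
  let E := ((PySem.List.enumerate wires 0).filter (fun p => p.1 != cut)).map (·.2)
  let visit0 := List.replicate (n + 1).toNat false
  let visit1 := PySem.List.pySetD visit0 1 true  -- visit[1] = True (IndexError when n < 1; excluded by Pre_)
  let visitF := loopB E n.toNat visit1
  -- s = sum(visit[1:])  (a Python sum of booleans = the number of True entries)
  let s : Int := ((PySem.List.slice visitF (some 1) none).count true : Nat)
  ((2 * s - n).natAbs : Int)

-- ===== PRECONDITION & SPEC =====

-- Pre_ excludes exactly the inputs where Python A raises IndexError: n < 1 (visit[1] does not
-- exist) or some non-cut wire with an endpoint outside [-(n+1), n] (tower[v] raises); B raises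
-- an IndexError on those same inputs.
def Pre_bfs (cut : Int) (n : Int) (wires : List (Int × Int)) : Prop :=
  1 ≤ n ∧ ∀ p ∈ PySem.List.enumerate wires 0,
    p.1 = cut ∨ (PySem.Raise.InRange (n + 1).toNat p.2.1 ∧ PySem.Raise.InRange (n + 1).toNat p.2.2)
instance (cut : Int) (n : Int) (wires : List (Int × Int)) : Decidable (Pre_bfs cut n wires) := by
  unfold Pre_bfs; infer_instance

def pvWitness_bfs : Int × Int × (List (Int × Int)) := (1, 4, [(1, 3), (2, 3), (3, 4)])

def Spec_bfs (cut : Int) (n : Int) (wires : List (Int × Int)) (out : Int) : Prop := out = bfs_alt cut n wires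
instance (cut : Int) (n : Int) (wires : List (Int × Int)) (out : Int) : Decidable (Spec_bfs cut n wires out) := by
  unfold Spec_bfs; infer_instance

-- ===== CLAIM (what is proved, stated in full; the proofs are below) =====
def Claim_equal_bfs : Prop := ∀ (cut : Int) (n : Int) (wires : List (Int × Int)), Dom_bfs cut n wires → Pre_bfs cut n wires → Spec_bfs cut n wires (bfs cut n wires)

-- ===== LEMMAS AND PROOFS =====

theorem pj_lt {L : Nat} {v : Int} (h : PySem.Raise.InRange L v) : pj L v < L := by
  have := pj_eq h
  obtain ⟨h1, h2⟩ := h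
  split_ifs at this <;> omega


-- adjacency read off A's adjacency lists, over normalized node indices
def AdjT (T : List (List Int)) (j k : Nat) : Prop :=
  ∃ v ∈ T.getD j [], PySem.List.pyIdx? T.length v = some k

-- adjacency read off B's filtered edge list, over normalized node indices
def AdjE (L : Nat) (E : List (Int × Int)) (j k : Nat) : Prop :=
  ∃ e ∈ E, PySem.Raise.InRange L e.1 ∧ PySem.Raise.InRange L e.2 ∧
    ((pj L e.1 = j ∧ pj L e.2 = k) ∨ (pj L e.2 = j ∧ pj L e.1 = k))

theorem set_true_getD_mono {xs : List Bool} {j k : Nat} (h : xs.getD j false = true) :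
    (xs.set k true).getD j false = true := by
  simp only [List.getD_eq_getElem?_getD, List.getElem?_set] at *
  split_ifs with h1 h2
  · rfl
  · subst h1; simp_all
  · exact h

theorem getD_set_self {xs : List Bool} {k : Nat} (h : k < xs.length) :
    (xs.set k true).getD k false = true := by
  simp [List.getD_eq_getElem?_getD, List.getElem?_set, h]

theorem getD_set_src {xs : List Bool} {j k : Nat} (h : (xs.set k true).getD j false = true) :
    xs.getD j false = true ∨ j = k := by
  simp only [List.getD_eq_getElem?_getD, List.getElem?_set] at h
  by_cases hk : k = j
  · right; omega
  · left; simpa [hk] using h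

theorem getD_set_eq {α : Type} {t : List α} {k : Nat} (h : k < t.length) (x : α) (d : α) :
    (t.set k x).getD k d = x := by
  simp [List.getD_eq_getElem?_getD, List.getElem?_set, h]

theorem getD_set_ne {α : Type} {t : List α} {j k : Nat} (h : j ≠ k) (x : α) (d : α) :
    (t.set k x).getD j d = t.getD j d := by
  simp [List.getD_eq_getElem?_getD, List.getElem?_set, (Ne.symm h : k ≠ j)]

theorem getD_eq_of_lt {α : Type} {t : List α} {k : Nat} (h : k < t.length) (d : α) :
    t[k]? = some (t.getD k d) := by
  simp [List.getD_eq_getElem?_getD, List.getElem?_eq_getElem h]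

theorem pyGet?_eq_some_pyGetD {α : Type} {xs : List α} {i : Int} (d : α)
    (h : PySem.Raise.InRange xs.length i) :
    PySem.List.pyGet? xs i = some (PySem.List.pyGetD xs i d) := by
  cases hg : PySem.List.pyGet? xs i with
  | none => exact absurd (PySem.List.pyGet?_eq_none_iff xs i |>.mp hg) (by simpa using h)
  | some a => simp [PySem.List.pyGetD, hg]

theorem count_true_set {xs : List Bool} {j : Nat} (h : xs[j]? = some false) :
    (xs.set j true).count true = xs.count true + 1 := by
  induction xs generalizing j with
  | nil => simp at h
  | cons a t ih =>
    cases j with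
    | zero => simp_all [List.count_cons]
    | succ m =>
      simp only [List.getElem?_cons_succ] at h
      have := ih h
      simp only [List.set_cons_succ, List.count_cons]
      omega

theorem count_true_set_le (xs : List Bool) (j : Nat) :
    xs.count true ≤ (xs.set j true).count true := by
  induction xs generalizing j with
  | nil => simp
  | cons a t ih =>
    cases j with
    | zero => cases a <;> simp [List.count_cons]
    | succ m =>
      simp only [List.set_cons_succ, List.count_cons]
      have := ih m
      omega

theorem nbrFold_cons (visit : List Bool) (q : List Int) (v : Int) (t : List Int) :
    nbrFold visit q (v :: t) =
      match PySem.List.pyGet? visit v with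
      | some false => nbrFold (PySem.List.pySetD visit v true) (q ++ [v]) t
      | _ => nbrFold visit q t := by
  rw [nbrFold, List.foldl_cons]
  cases hg : PySem.List.pyGet? visit v with
  | none => rfl
  | some b => cases b <;> rfl

theorem nbrFold_spec (nbrs : List Int) (visit : List Bool) (q : List Int)
    (hn : ∀ v ∈ nbrs, PySem.Raise.InRange visit.length v)
    (hq : ∀ v ∈ q, PySem.Raise.InRange visit.length v ∧ visit.getD (pj visit.length v) false = true) :
    (nbrFold visit q nbrs).1.length = visit.length ∧
    (∀ j, visit.getD j false = true → (nbrFold visit q nbrs).1.getD j false = true) ∧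
    (∀ j, (nbrFold visit q nbrs).1.getD j false = true →
      visit.getD j false = true ∨ ∃ v ∈ nbrs, pj visit.length v = j) ∧
    (∀ v ∈ nbrs, (nbrFold visit q nbrs).1.getD (pj visit.length v) false = true) ∧
    (∀ v ∈ (nbrFold visit q nbrs).2, v ∈ q ∨ v ∈ nbrs) ∧
    (∀ v ∈ q, v ∈ (nbrFold visit q nbrs).2) ∧
    (∀ v ∈ (nbrFold visit q nbrs).2, PySem.Raise.InRange visit.length v ∧
      (nbrFold visit q nbrs).1.getD (pj visit.length v) false = true) ∧
    (∀ v ∈ nbrs, visit.getD (pj visit.length v) false = false →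
      ∃ w ∈ (nbrFold visit q nbrs).2, pj visit.length w = pj visit.length v) := by
  induction nbrs generalizing visit q with
  | nil =>
    refine ⟨rfl, fun j h => h, fun j h => Or.inl h, by simp, fun v hv => Or.inl hv, fun v hv => hv,
      fun v hv => hq v hv, by simp⟩
  | cons w t ih =>
    rw [nbrFold_cons]
    have hw : PySem.Raise.InRange visit.length w := hn w (by simp)
    cases hg : PySem.List.pyGet? visit w with
    | none => rw [pyGet?_inRange hw] at hg; simp [pj_lt hw] at hg
    | some b =>
      cases b with
      | true =>
        have hwm : visit.getD (pj visit.length w) false = true := by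
          rw [pyGet?_inRange hw] at hg
          simp [List.getD_eq_getElem?_getD, hg]
        obtain ⟨c1, c2, c3, c4, c5, c6, c7, c8⟩ := ih visit q (fun v hv => hn v (by simp [hv])) hq
        refine ⟨c1, c2, ?_, ?_, ?_, c6, c7, ?_⟩
        · intro j hj
          rcases c3 j hj with h | ⟨v, hv, hpv⟩
          · exact Or.inl h
          · exact Or.inr ⟨v, by simp [hv], hpv⟩
        · intro v hv
          rcases List.mem_cons.mp hv with rfl | hv'
          · exact c2 _ hwm
          · exact c4 v hv'
        · intro v hv
          rcases c5 v hv with h | h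
          · exact Or.inl h
          · exact Or.inr (by simp [h])
        · intro v hv hf
          rcases List.mem_cons.mp hv with rfl | hv'
          · rw [hwm] at hf; exact absurd hf (by simp)
          · exact c8 v hv' hf
      | false =>
        set visit' := PySem.List.pySetD visit w true with hv'
        have hlen' : visit'.length = visit.length := by
          rw [hv', pySetD_inRange hw]; simp
        have hmark : visit'.getD (pj visit.length w) false = true := by
          rw [hv', pySetD_inRange hw]; exact getD_set_self (pj_lt hw)
        have hmono : ∀ j, visit.getD j false = true → visit'.getD j false = true := by
          intro j hj; rw [hv', pySetD_inRange hw]; exact set_true_getD_mono hj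
        have hsrc : ∀ j, visit'.getD j false = true →
            visit.getD j false = true ∨ j = pj visit.length w := by
          intro j hj; rw [hv', pySetD_inRange hw] at hj; exact getD_set_src hj
        have hn' : ∀ v ∈ t, PySem.Raise.InRange visit'.length v := by
          intro v hv; rw [hlen']; exact hn v (by simp [hv])
        have hq' : ∀ v ∈ q ++ [w], PySem.Raise.InRange visit'.length v ∧
            visit'.getD (pj visit'.length v) false = true := by
          intro v hv
          rw [hlen']
          rcases List.mem_append.mp hv with h | h
          · exact ⟨(hq v h).1, hmono _ (hq v h).2⟩
          · simp only [List.mem_singleton] at h; subst h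
            exact ⟨hw, hmark⟩
        obtain ⟨c1, c2, c3, c4, c5, c6, c7, c8⟩ := ih visit' (q ++ [w]) hn' hq'
        rw [hlen'] at c1 c3 c4 c7 c8
        refine ⟨c1, ?_, ?_, ?_, ?_, ?_, c7, ?_⟩
        · intro j hj; exact c2 j (hmono j hj)
        · intro j hj
          rcases c3 j hj with h | ⟨v, hv, hpv⟩
          · rcases hsrc j h with h' | h'
            · exact Or.inl h'
            · exact Or.inr ⟨w, by simp, h'.symm⟩
          · exact Or.inr ⟨v, by simp [hv], hpv⟩
        · intro v hv
          rcases List.mem_cons.mp hv with rfl | hv'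
          · exact c2 _ hmark
          · exact c4 v hv'
        · intro v hv
          rcases c5 v hv with h | h
          · rcases List.mem_append.mp h with h' | h'
            · exact Or.inl h'
            · simp only [List.mem_singleton] at h'; subst h'; exact Or.inr (by simp)
          · exact Or.inr (by simp [h])
        · intro v hv; exact c6 v (List.mem_append_left _ hv)
        · intro v hv hf
          rcases List.mem_cons.mp hv with rfl | hv'
          · exact ⟨v, c6 v (by simp), rfl⟩
          · by_cases hm : visit'.getD (pj visit.length v) false = true
            · rcases hsrc _ hm with h' | h'
              · rw [hf] at h'; exact absurd h' (by simp)
              · exact ⟨w, c6 w (by simp), h'.symm⟩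
            · exact c8 v hv' (by simpa using hm)

theorem AdjT_iff {T : List (List Int)} (hTv : ∀ j v, v ∈ T.getD j [] → PySem.Raise.InRange T.length v)
    {j k : Nat} : AdjT T j k ↔ ∃ v ∈ T.getD j [], pj T.length v = k := by
  constructor
  · rintro ⟨v, hv, hidx⟩
    rw [pyIdx?_inRange (hTv j v hv)] at hidx
    exact ⟨v, hv, by injection hidx⟩
  · rintro ⟨v, hv, rfl⟩
    exact ⟨v, hv, pyIdx?_inRange (hTv j v hv)⟩

theorem bfsLoop_spec (T : List (List Int)) (Good : Nat → Prop)
    (hTv : ∀ j v, v ∈ T.getD j [] → PySem.Raise.InRange T.length v)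
    (hGc : ∀ j k, Good j → AdjT T j k → Good k)
    (visit : List Bool) (q : List Int) :
    visit.length = T.length →
    (∀ v ∈ q, PySem.Raise.InRange T.length v ∧ visit.getD (pj T.length v) false = true) →
    (∀ j, visit.getD j false = true → Good j) →
    (∀ j k, visit.getD j false = true → (∀ v ∈ q, pj T.length v ≠ j) → AdjT T j k →
      visit.getD k false = true) →
    (bfsLoop T visit q).length = T.length ∧
    (∀ j, visit.getD j false = true → (bfsLoop T visit q).getD j false = true) ∧
    (∀ j, (bfsLoop T visit q).getD j false = true → Good j) ∧
    (∀ j k, (bfsLoop T visit q).getD j false = true → AdjT T j k →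
      (bfsLoop T visit q).getD k false = true) := by
  induction visit, q using bfsLoop.induct T with
  | case1 visit =>
    intro hlen hq hsound hfront
    rw [bfsLoop]
    exact ⟨hlen, fun j h => h, hsound, fun j k hj hadj => hfront j k hj (by simp) hadj⟩
  | case2 visit cur rest nbrs0 s0 ih =>
    intro hlen hq hsound hfront
    rw [bfsLoop]
    set nbrs := (PySem.List.pyGet? T cur).getD [] with hnbrs
    set s := nbrFold visit rest nbrs with hs
    have hcur := hq cur (by simp)
    have hnbrsEq : nbrs = T.getD (pj T.length cur) [] := by
      rw [hnbrs, pyGet?_inRange hcur.1]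
      simp [List.getD_eq_getElem?_getD]
    have hn : ∀ v ∈ nbrs, PySem.Raise.InRange visit.length v := by
      intro v hv; rw [hlen]; exact hTv _ v (hnbrsEq ▸ hv)
    have hqr : ∀ v ∈ rest, PySem.Raise.InRange visit.length v ∧
        visit.getD (pj visit.length v) false = true := by
      intro v hv; rw [hlen]; exact hq v (by simp [hv])
    obtain ⟨c1, c2, c3, c4, c5, c6, c7, c8⟩ := nbrFold_spec nbrs visit rest hn hqr
    rw [hlen] at c1 c3 c4 c7 c8
    -- hypotheses for the recursive call
    have hq' : ∀ v ∈ s.2, PySem.Raise.InRange T.length v ∧ s.1.getD (pj T.length v) false = true :=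
      c7
    have hsound' : ∀ j, s.1.getD j false = true → Good j := by
      intro j hj
      rcases c3 j hj with h | ⟨v, hv, rfl⟩
      · exact hsound j h
      · exact hGc _ _ (hsound _ hcur.2) ((AdjT_iff hTv).mpr ⟨v, hnbrsEq ▸ hv, rfl⟩)
    have hfront' : ∀ j k, s.1.getD j false = true → (∀ v ∈ s.2, pj T.length v ≠ j) →
        AdjT T j k → s.1.getD k false = true := by
      intro j k hj hqf hadj
      have hvisitj : visit.getD j false = true → s.1.getD k false = true := by
        intro hvj
        by_cases hjc : pj T.length cur = j
        · subst hjc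
          obtain ⟨v, hv, rfl⟩ := (AdjT_iff hTv).mp hadj
          exact c4 v (hnbrsEq ▸ hv)
        · exact c2 _ (hfront j k hvj
            (by
              intro v hv
              rcases List.mem_cons.mp hv with rfl | hv'
              · exact hjc
              · exact hqf v (c6 v hv')) hadj)
      rcases c3 j hj with h | ⟨v, hv, rfl⟩
      · exact hvisitj h
      · by_cases hm : visit.getD (pj T.length v) false = true
        · exact hvisitj hm
        · obtain ⟨w, hw, hpw⟩ := c8 v hv (by simpa using hm)
          exact absurd hpw (hqf w hw)
    obtain ⟨d1, d2, d3, d4⟩ := ih c1 hq' hsound' hfront'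
    exact ⟨d1, fun j hj => d2 j (c2 j hj), d3, d4⟩

theorem towerStep_mem (cut : Int) (t : List (List Int)) (p : Int × (Int × Int))
    (hp : p.1 = cut ∨ (PySem.Raise.InRange t.length p.2.1 ∧ PySem.Raise.InRange t.length p.2.2)) :
    (towerStep cut t p).length = t.length ∧
    (∀ j v, v ∈ (towerStep cut t p).getD j [] ↔ v ∈ t.getD j [] ∨
      (p.1 ≠ cut ∧ PySem.Raise.InRange t.length p.2.1 ∧ PySem.Raise.InRange t.length p.2.2 ∧
        ((pj t.length p.2.1 = j ∧ p.2.2 = v) ∨ (pj t.length p.2.2 = j ∧ p.2.1 = v)))) := by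
  by_cases hc : p.1 = cut
  · simp [towerStep, hc]
  · obtain ⟨h1, h2⟩ := hp.resolve_left hc
    have hpj1 := pj_lt h1
    have hpj2 := pj_lt h2
    rw [towerStep, if_neg hc, pyGet?_inRange h1, getD_eq_of_lt hpj1 []]
    dsimp only
    set l1 := t.getD (pj t.length p.2.1) [] with hl1
    set t1 := PySem.List.pySetD t p.2.1 (l1 ++ [p.2.2]) with ht1
    have ht1' : t1 = t.set (pj t.length p.2.1) (l1 ++ [p.2.2]) := by
      rw [ht1, pySetD_inRange h1]
    have hlen1 : t1.length = t.length := by rw [ht1']; simp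
    have h2' : PySem.Raise.InRange t1.length p.2.2 := by rw [hlen1]; exact h2
    rw [pyGet?_inRange h2', getD_eq_of_lt (by rw [hlen1]; exact (hlen1 ▸ pj_lt h2')) []]
    dsimp only
    set l2 := t1.getD (pj t1.length p.2.2) [] with hl2
    set t2 := PySem.List.pySetD t1 p.2.2 (l2 ++ [p.2.1]) with ht2
    have ht2' : t2 = t1.set (pj t1.length p.2.2) (l2 ++ [p.2.1]) := by
      rw [ht2, pySetD_inRange h2']
    have hlen2 : t2.length = t.length := by rw [ht2']; simpa using hlen1
    have hpjeq : pj t1.length p.2.2 = pj t.length p.2.2 := by rw [hlen1]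
    refine ⟨hlen2, ?_⟩
    intro j v
    by_cases hj2 : pj t.length p.2.2 = j
    · subst hj2
      rw [ht2', hpjeq, getD_set_eq (by rw [hlen1]; exact hpj2)]
      by_cases hj1 : pj t.length p.2.1 = pj t.length p.2.2
      · rw [hl2, hpjeq, ht1', ← hj1, getD_set_eq hpj1, hl1, hj1]
        simp only [List.mem_append, List.mem_singleton, eq_comm]
        tauto
      · rw [hl2, hpjeq, ht1', getD_set_ne (fun h => hj1 (h.symm))]
        simp only [List.mem_append, List.mem_singleton, eq_comm]
        tauto
    · rw [ht2', hpjeq, getD_set_ne (fun h => hj2 h.symm)]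
      by_cases hj1 : pj t.length p.2.1 = j
      · subst hj1
        rw [ht1', getD_set_eq hpj1, hl1]
        simp only [List.mem_append, List.mem_singleton, eq_comm]
        tauto
      · rw [ht1', getD_set_ne (fun h => hj1 h.symm)]
        constructor
        · exact Or.inl
        · rintro (h | ⟨-, -, -, (⟨he, rfl⟩ | ⟨he, rfl⟩)⟩)
          · exact h
          · exact absurd he hj1
          · exact absurd he hj2

theorem towerFold_mem (cut : Int) (ps : List (Int × (Int × Int))) (t : List (List Int))
    (hp : ∀ p ∈ ps, p.1 = cut ∨
      (PySem.Raise.InRange t.length p.2.1 ∧ PySem.Raise.InRange t.length p.2.2)) :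
    (ps.foldl (towerStep cut) t).length = t.length ∧
    (∀ j v, v ∈ (ps.foldl (towerStep cut) t).getD j [] ↔ v ∈ t.getD j [] ∨
      ∃ p ∈ ps, p.1 ≠ cut ∧ PySem.Raise.InRange t.length p.2.1 ∧
        PySem.Raise.InRange t.length p.2.2 ∧
        ((pj t.length p.2.1 = j ∧ p.2.2 = v) ∨ (pj t.length p.2.2 = j ∧ p.2.1 = v))) := by
  induction ps generalizing t with
  | nil => simp
  | cons p ps ih =>
    rw [List.foldl_cons]
    have hstep := towerStep_mem cut t p (hp p (by simp))
    have hp' : ∀ r ∈ ps, r.1 = cut ∨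
        (PySem.Raise.InRange (towerStep cut t p).length r.2.1 ∧
         PySem.Raise.InRange (towerStep cut t p).length r.2.2) := by
      intro r hr; rw [hstep.1]; exact hp r (by simp [hr])
    obtain ⟨f1, f2⟩ := ih (towerStep cut t p) hp'
    rw [hstep.1] at f1 f2
    refine ⟨f1, ?_⟩
    intro j v
    rw [f2 j v, hstep.2 j v]
    constructor
    · rintro ((h | h) | ⟨r, hr, hrest⟩)
      · exact Or.inl h
      · exact Or.inr ⟨p, by simp, h⟩
      · exact Or.inr ⟨r, by simp [hr], hrest⟩
    · rintro (h | ⟨r, hr, hrest⟩)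
      · exact Or.inl (Or.inl h)
      · rcases List.mem_cons.mp hr with rfl | hr'
        · exact Or.inl (Or.inr hrest)
        · exact Or.inr ⟨r, hr', hrest⟩

theorem passStep_eq {visit : List Bool} {b : Bool} {e : Int × Int}
    (h1 : PySem.Raise.InRange visit.length e.1) (h2 : PySem.Raise.InRange visit.length e.2) :
    passStep (visit, b) e =
      if visit.getD (pj visit.length e.1) false != visit.getD (pj visit.length e.2) false then
        ((visit.set (pj visit.length e.1) true).set (pj visit.length e.2) true, true)
      else (visit, b) := by
  rw [passStep]
  simp only
  rw [pyGet?_inRange h1, pyGet?_inRange h2, getD_eq_of_lt (pj_lt h1) false,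
    getD_eq_of_lt (pj_lt h2) false]
  simp only
  split_ifs with h
  · rw [pySetD_inRange h1]
    have h2' : PySem.Raise.InRange (visit.set (pj visit.length e.1) true).length e.2 := by
      simpa using h2
    rw [pySetD_inRange h2']
    simp
  · rfl

theorem pj_ne_of_getD_ne {visit : List Bool} {L : Nat} {e : Int × Int}
    (hne : visit.getD (pj L e.1) false ≠ visit.getD (pj L e.2) false) :
    pj L e.1 ≠ pj L e.2 := by
  intro h; rw [h] at hne; exact hne rfl

theorem passFold_spec (Good : Nat → Prop) (E : List (Int × Int)) (L : Nat)
    (hGc : ∀ j k, Good j → AdjE L E j k → Good k)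
    (l : List (Int × Int)) (hsub : ∀ e ∈ l, e ∈ E)
    (hE : ∀ e ∈ l, PySem.Raise.InRange L e.1 ∧ PySem.Raise.InRange L e.2) :
    ∀ (visit : List Bool) (b : Bool), visit.length = L →
    (∀ j, visit.getD j false = true → Good j) →
    (l.foldl passStep (visit, b)).1.length = L ∧
    (∀ j, visit.getD j false = true → (l.foldl passStep (visit, b)).1.getD j false = true) ∧
    (∀ j, (l.foldl passStep (visit, b)).1.getD j false = true → Good j) ∧
    ((l.foldl passStep (visit, b)).2 = false → b = false ∧
      (l.foldl passStep (visit, b)).1 = visit ∧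
      ∀ e ∈ l, visit.getD (pj L e.1) false = visit.getD (pj L e.2) false) ∧
    (visit.count true ≤ (l.foldl passStep (visit, b)).1.count true) ∧
    ((l.foldl passStep (visit, b)).2 = true → b = true ∨
      visit.count true < (l.foldl passStep (visit, b)).1.count true) ∧
    (b = true → (l.foldl passStep (visit, b)).2 = true) := by
  induction l with
  | nil =>
    intro visit b hlen hsound
    exact ⟨hlen, fun j h => h, hsound, fun h => ⟨h, rfl, by simp⟩, le_refl _, fun h => Or.inl h,
      fun h => h⟩
  | cons e t ih =>
    intro visit b hlen hsound
    rw [List.foldl_cons]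
    have hsub' : ∀ e' ∈ t, e' ∈ E := fun e' he' => hsub e' (by simp [he'])
    have hEt : ∀ e' ∈ t, PySem.Raise.InRange L e'.1 ∧ PySem.Raise.InRange L e'.2 :=
      fun e' he' => hE e' (by simp [he'])
    obtain ⟨he1, he2⟩ := hE e (by simp)
    rw [passStep_eq (hlen ▸ he1) (hlen ▸ he2), hlen]
    split_ifs with hch
    · -- the edge fires: both endpoints marked, changed := true
      simp only [bne_iff_ne, ne_eq] at hch
      set visit' := (visit.set (pj L e.1) true).set (pj L e.2) true with hv'
      have hlen' : visit'.length = L := by rw [hv']; simpa using hlen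
      have hpj1 : pj L e.1 < visit.length := by rw [hlen]; exact pj_lt he1
      have hpjne : pj L e.1 ≠ pj L e.2 := pj_ne_of_getD_ne hch
      have hGoodBoth : Good (pj L e.1) ∧ Good (pj L e.2) := by
        have hadj1 : AdjE L E (pj L e.1) (pj L e.2) :=
          ⟨e, hsub e (by simp), he1, he2, Or.inl ⟨rfl, rfl⟩⟩
        have hadj2 : AdjE L E (pj L e.2) (pj L e.1) :=
          ⟨e, hsub e (by simp), he1, he2, Or.inr ⟨rfl, rfl⟩⟩
        cases hb1 : visit.getD (pj L e.1) false with
        | true => exact ⟨hsound _ hb1, hGc _ _ (hsound _ hb1) hadj1⟩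
        | false =>
          have hb2 : visit.getD (pj L e.2) false = true := by
            cases hb2 : visit.getD (pj L e.2) false with
            | true => rfl
            | false => rw [hb1, hb2] at hch; exact absurd rfl hch
          exact ⟨hGc _ _ (hsound _ hb2) hadj2, hsound _ hb2⟩
      have hsound' : ∀ j, visit'.getD j false = true → Good j := by
        intro j hj
        rw [hv'] at hj
        rcases getD_set_src hj with hj' | rfl
        · rcases getD_set_src hj' with hj'' | rfl
          · exact hsound j hj''
          · exact hGoodBoth.1
        · exact hGoodBoth.2
      have hcount : visit.count true < visit'.count true := by
        rw [hv']
        cases hb1 : visit.getD (pj L e.1) false with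
        | false =>
          have : visit[pj L e.1]? = some false := by
            rw [getD_eq_of_lt hpj1 false, hb1]
          calc visit.count true < (visit.set (pj L e.1) true).count true := by
                rw [count_true_set this]; omega
            _ ≤ _ := count_true_set_le _ _
        | true =>
          have hb2 : visit.getD (pj L e.2) false = false := by
            cases hb2 : visit.getD (pj L e.2) false with
            | false => rfl
            | true => rw [hb1, hb2] at hch; exact absurd rfl hch
          have hpj2 : pj L e.2 < visit.length := by rw [hlen]; exact pj_lt he2
          have : (visit.set (pj L e.1) true)[pj L e.2]? = some false := by
            rw [List.getElem?_set_ne hpjne]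
            rw [getD_eq_of_lt hpj2 false, hb2]
          have hc2 := count_true_set this
          have hc1 := count_true_set_le visit (pj L e.1)
          omega
      obtain ⟨c1, c2, c3, c4, c5, c6, c7⟩ := ih hsub' hEt visit' true hlen' hsound'
      refine ⟨c1, ?_, c3, ?_, ?_, ?_, ?_⟩
      · intro j hj
        exact c2 j (by rw [hv']; exact set_true_getD_mono (set_true_getD_mono hj))
      · intro hb
        rw [c7 rfl] at hb
        exact absurd hb (by simp)
      · calc visit.count true ≤ visit'.count true := le_of_lt hcount
          _ ≤ _ := c5
      · intro _
        right
        calc visit.count true < visit'.count true := hcount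
          _ ≤ _ := c5
      · intro _
        exact c7 rfl
    · obtain ⟨c1, c2, c3, c4, c5, c6, c7⟩ := ih hsub' hEt visit b hlen hsound
      refine ⟨c1, c2, c3, ?_, c5, c6, c7⟩
      intro hb
      obtain ⟨d0, d1, d2⟩ := c4 hb
      refine ⟨d0, d1, ?_⟩
      intro e' he'
      rcases List.mem_cons.mp he' with rfl | he''
      · simpa using hch
      · exact d2 e' he''

theorem loopB_spec (Good : Nat → Prop) (E : List (Int × Int)) (L : Nat)
    (hGc : ∀ j k, Good j → AdjE L E j k → Good k)
    (hE : ∀ e ∈ E, PySem.Raise.InRange L e.1 ∧ PySem.Raise.InRange L e.2) :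
    ∀ (fuel : Nat) (visit : List Bool), visit.length = L →
    (∀ j, visit.getD j false = true → Good j) →
    (loopB E fuel visit).length = L ∧
    (∀ j, visit.getD j false = true → (loopB E fuel visit).getD j false = true) ∧
    (∀ j, (loopB E fuel visit).getD j false = true → Good j) ∧
    ((∀ e ∈ E, (loopB E fuel visit).getD (pj L e.1) false =
        (loopB E fuel visit).getD (pj L e.2) false) ∨
      visit.count true + fuel ≤ (loopB E fuel visit).count true) := by
  intro fuel
  induction fuel with
  | zero =>
    intro visit hlen hsound
    simp only [loopB]
    exact ⟨hlen, fun j h => h, hsound, Or.inr (by omega)⟩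
  | succ k ih =>
    intro visit hlen hsound
    rw [loopB]
    obtain ⟨c1, c2, c3, c4, c5, c6, c7⟩ :=
      passFold_spec Good E L hGc E (fun e he => he) hE visit false hlen hsound
    cases hflag : (passB E visit).2 with
    | true =>
      rw [if_pos rfl]
      have hcnt : visit.count true < (passB E visit).1.count true := by
        rcases c6 hflag with h | h
        · exact absurd h (by simp)
        · exact h
      obtain ⟨d1, d2, d3, d4⟩ := ih (passB E visit).1 c1 c3
      refine ⟨d1, fun j hj => d2 j (c2 j hj), d3, ?_⟩
      rcases d4 with h | h
      · exact Or.inl h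
      · exact Or.inr (by omega)
    | false =>
      rw [if_neg (by simp)]
      obtain ⟨-, d1, d2⟩ := c4 hflag
      rw [show (passB E visit).1 = visit from d1]
      exact ⟨hlen, fun j h => h, hsound, Or.inl d2⟩

theorem countFold_eq (l : List Bool) (a b : Int) :
    l.foldl (fun (p : Int × Int) (v : Bool) =>
      if v then (p.1 + 1, p.2) else (p.1, p.2 + 1)) (a, b) =
      (a + l.count true, b + l.count false) := by
  induction l generalizing a b with
  | nil => simp
  | cons x t ih =>
    cases x <;> simp [List.count_cons, ih] <;> ring_nf

-- the A-side tally loop over range(1, n+1), for xs of length (n+1).toNat, n ≥ 1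

theorem tally_eq (xs : List Bool) (n : Int) (hn : 1 ≤ n) (hlen : xs.length = (n + 1).toNat) :
    (PySem.List.pyRange 1 (n + 1) 1).foldl
      (fun (p : Int × Int) i =>
        match (PySem.List.pyIdx? xs.toArray.size i).bind (fun k => xs.toArray[k]?) with
        | some true => (p.1 + 1, p.2)
        | some false => (p.1, p.2 + 1)
        | none => p) (0, 0) =
      ((((xs.drop 1).count true : Nat) : Int), (((xs.drop 1).count false : Nat) : Int)) := by
  have hlen' : (xs.length : Int) = n + 1 := by omega
  have hcongr : ∀ (p : Int × Int), ∀ i ∈ PySem.List.pyRange 1 (n + 1) 1,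
      (match (PySem.List.pyIdx? xs.toArray.size i).bind (fun k => xs.toArray[k]?) with
        | some true => (p.1 + 1, p.2)
        | some false => (p.1, p.2 + 1)
        | none => p) =
      (fun (p : Int × Int) i =>
        (fun (q : Int × Int) (v : Bool) => if v then (q.1 + 1, q.2) else (q.1, q.2 + 1)) p
          (PySem.List.pyGetD xs i false)) p i := by
    intro p i hi
    rw [PySem.List.mem_pyRange_one] at hi
    have hir : PySem.Raise.InRange xs.length i := by
      constructor <;> omega
    have harr : (PySem.List.pyIdx? xs.toArray.size i).bind (fun k => xs.toArray[k]?) =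
        PySem.List.pyGet? xs i := by
      simp [PySem.List.pyGet?]
    rw [harr, pyGet?_eq_some_pyGetD false hir]
    cases h : PySem.List.pyGetD xs i false <;> simp [h]
  rw [PySem.List.foldl_congr_mem _ _ _ _ hcongr]
  rw [← hlen']
  rw [PySem.List.foldl_pyRange_pyGetD' xs false
    (fun (q : Int × Int) (v : Bool) => if v then (q.1 + 1, q.2) else (q.1, q.2 + 1)) (0, 0)
    (by omega : (0:Int) ≤ 1)]
  rw [countFold_eq]
  simp

-- ------- final assembly helpers -------

theorem getD_replicate' {α : Type} (L j : Nat) (d x : α) :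
    (List.replicate L x).getD j d = if j < L then x else d := by
  simp [List.getD_eq_getElem?_getD, List.getElem?_replicate]
  split_ifs <;> simp

theorem list_bool_ext {xs ys : List Bool} (hl : xs.length = ys.length)
    (h : ∀ j, xs.getD j false = ys.getD j false) : xs = ys := by
  apply List.ext_getElem hl
  intro j h1 h2
  have := h j
  rwa [List.getD_eq_getElem?_getD, List.getD_eq_getElem?_getD,
    List.getElem?_eq_getElem h1, List.getElem?_eq_getElem h2] at this

theorem count_true_add_count_false (l : List Bool) :
    l.count true + l.count false = l.length := by
  induction l with
  | nil => simp
  | cons a t ih => cases a <;> simp [List.count_cons] <;> omega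

-- The heart of the equivalence: under Pre_, A's BFS and B's fixpoint sweep mark the same cells.
theorem visit_eq (cut : Int) (n : Int) (wires : List (Int × Int))
    (hn : 1 ≤ n)
    (hpw : ∀ p ∈ PySem.List.enumerate wires 0, p.1 = cut ∨
      (PySem.Raise.InRange (n + 1).toNat p.2.1 ∧ PySem.Raise.InRange (n + 1).toNat p.2.2)) :
    bfsLoop (buildTower cut (n + 1).toNat wires)
        (PySem.List.pySetD (List.replicate (n + 1).toNat false) 1 true) [1]
      = loopB (((PySem.List.enumerate wires 0).filter (fun p => p.1 != cut)).map (·.2)) n.toNat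
        (PySem.List.pySetD (List.replicate (n + 1).toNat false) 1 true) ∧
    (loopB (((PySem.List.enumerate wires 0).filter (fun p => p.1 != cut)).map (·.2)) n.toNat
        (PySem.List.pySetD (List.replicate (n + 1).toNat false) 1 true)).length
      = (n + 1).toNat := by
  have hL2 : 2 ≤ (n + 1).toNat := by omega
  set L := (n + 1).toNat with hLdef
  set ew := PySem.List.enumerate wires 0 with hew
  set E := (ew.filter (fun p => p.1 != cut)).map (·.2) with hE
  set T := buildTower cut L wires with hT
  -- initial visit list
  have hIn1 : PySem.Raise.InRange L (1 : Int) := ⟨by omega, by omega⟩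
  have hpj1 : pj L (1 : Int) = 1 := by
    have := pj_eq hIn1
    simp at this
    omega
  have hrep : (List.replicate L false).length = L := by simp
  set v1 := PySem.List.pySetD (List.replicate L false) 1 true with hv1
  have hv1' : v1 = (List.replicate L false).set 1 true := by
    rw [hv1, pySetD_inRange (by rw [hrep]; exact hIn1), hrep, hpj1]
  have hv1len : v1.length = L := by rw [hv1']; simp
  have hv1one : v1.getD 1 false = true := by
    rw [hv1']; exact getD_set_self (by simp; omega)
  have hv1src : ∀ j, v1.getD j false = true → j = 1 := by
    intro j hj
    rw [hv1'] at hj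
    rcases getD_set_src hj with h | h
    · rw [getD_replicate' L j false false] at h
      split_ifs at h <;> simp_all
    · exact h
  have hv1count : v1.count true = 1 := by
    rw [hv1', count_true_set (by simp [List.getElem?_replicate]; omega)]
    simp [List.count_replicate]
  -- tower characterization
  obtain ⟨hTlen0, hTmem0⟩ := towerFold_mem cut ew (List.replicate L [])
    (by simpa using hpw)
  have hTfold : T = ew.foldl (towerStep cut) (List.replicate L []) := rfl
  rw [← hTfold] at hTlen0 hTmem0
  simp only [List.length_replicate] at hTlen0 hTmem0
  have hTlen : T.length = L := hTlen0
  have hTmem : ∀ j v, v ∈ T.getD j [] ↔ ∃ p ∈ ew, p.1 ≠ cut ∧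
      PySem.Raise.InRange L p.2.1 ∧ PySem.Raise.InRange L p.2.2 ∧
      ((pj L p.2.1 = j ∧ p.2.2 = v) ∨ (pj L p.2.2 = j ∧ p.2.1 = v)) := by
    intro j v
    rw [hTmem0 j v, getD_replicate' L j [] []]
    split_ifs <;> simp
  have hTv : ∀ j v, v ∈ T.getD j [] → PySem.Raise.InRange T.length v := by
    intro j v hv
    rw [hTlen]
    obtain ⟨p, -, -, hi1, hi2, hc⟩ := (hTmem j v).mp hv
    rcases hc with ⟨-, rfl⟩ | ⟨-, rfl⟩
    · exact hi2
    · exact hi1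
  -- edge list characterization
  have hEmem : ∀ e, e ∈ E ↔ ∃ p ∈ ew, p.1 ≠ cut ∧ p.2 = e := by
    intro e
    rw [hE]
    simp [List.mem_map, List.mem_filter, bne_iff_ne]
  have hEIn : ∀ e ∈ E, PySem.Raise.InRange L e.1 ∧ PySem.Raise.InRange L e.2 := by
    intro e he
    obtain ⟨p, hp, hpc, rfl⟩ := (hEmem e).mp he
    exact (hpw p hp).resolve_left hpc
  -- graphs agree
  have hAdjeq : AdjT T = AdjE L E := by
    funext j k
    apply propext
    rw [AdjT_iff hTv]
    constructor
    · rintro ⟨v, hv, hpv⟩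
      obtain ⟨p, hp, hpc, hi1, hi2, hc⟩ := (hTmem j v).mp hv
      rw [hTlen] at hpv
      refine ⟨p.2, (hEmem p.2).mpr ⟨p, hp, hpc, rfl⟩, hi1, hi2, ?_⟩
      rcases hc with ⟨hj, rfl⟩ | ⟨hj, rfl⟩
      · exact Or.inl ⟨hj, hpv⟩
      · exact Or.inr ⟨hj, hpv⟩
    · rintro ⟨e, he, hi1, hi2, hc⟩
      obtain ⟨p, hp, hpc, rfl⟩ := (hEmem e).mp he
      rcases hc with ⟨hj, hk⟩ | ⟨hj, hk⟩
      · exact ⟨p.2.2, (hTmem j p.2.2).mpr ⟨p, hp, hpc, hi1, hi2, Or.inl ⟨hj, rfl⟩⟩,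
          by simp [hTlen, pyIdx?_inRange hi2, hk]⟩
      · exact ⟨p.2.1, (hTmem j p.2.1).mpr ⟨p, hp, hpc, hi1, hi2, Or.inr ⟨hj, rfl⟩⟩,
          by simp [hTlen, pyIdx?_inRange hi1, hk]⟩
  set Good : Nat → Prop := Relation.ReflTransGen (AdjE L E) 1 with hGood
  have hGc : ∀ j k, Good j → AdjT T j k → Good k := by
    intro j k hj hadj
    rw [hAdjeq] at hadj
    exact hj.tail hadj
  -- run the A loop
  obtain ⟨a1, a2, a3, a4⟩ := bfsLoop_spec T Good hTv hGc v1 [1]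
    (hv1len.trans hTlen.symm)
    (by
      intro v hv
      simp only [List.mem_singleton] at hv
      subst hv
      rw [hTlen]
      exact ⟨hIn1, by rw [hpj1]; exact hv1one⟩)
    (by
      intro j hj
      have hj1 := hv1src j hj
      subst hj1
      exact Relation.ReflTransGen.refl)
    (by
      intro j k hj hqf hadj
      exfalso
      exact hqf 1 (by simp) (by rw [hTlen, hpj1]; exact (hv1src j hj).symm))
  rw [hTlen] at a1
  set VA := bfsLoop T v1 [1] with hVA
  -- run the B loop
  have hGcE : ∀ j k, Good j → AdjE L E j k → Good k := fun j k hj hadj => hj.tail hadj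
  obtain ⟨b1, b2, b3, b4⟩ := loopB_spec Good E L hGcE hEIn n.toNat v1 hv1len
    (by
      intro j hj
      have hj1 := hv1src j hj
      subst hj1
      exact Relation.ReflTransGen.refl)
  set VB := loopB E n.toNat v1 with hVB
  -- every reachable index is below L
  have hreach_lt : ∀ j, Good j → j < L := by
    intro j hj
    rcases Relation.ReflTransGen.cases_tail hj with rfl | ⟨k, -, hadj⟩
    · omega
    · obtain ⟨e, -, hi1, hi2, hc⟩ := hadj
      rcases hc with ⟨-, rfl⟩ | ⟨-, rfl⟩
      · exact pj_lt hi2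
      · exact pj_lt hi1
  -- B marks every reachable index
  have hBreach : ∀ j, Good j → VB.getD j false = true := by
    intro j hj
    induction hj with
    | refl => exact b2 1 hv1one
    | @tail k j hk hadj ih =>
      rcases b4 with hcl | hcnt
      · obtain ⟨e, he, hi1, hi2, hc⟩ := hadj
        rcases hc with ⟨h1, h2⟩ | ⟨h1, h2⟩
        · rw [← h2, ← hcl e he, h1]; exact ih
        · rw [← h2, hcl e he, h1]; exact ih
      · -- the sweep ran L-1 times and grew each time: everything is marked
        have hall : ∀ b ∈ VB, true = b := by
          apply List.count_eq_length.mp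
          have hle := List.count_le_length (l := VB) (a := true)
          omega
        have hjlt : j < L := hreach_lt j (hk.tail hadj)
        have : VB.getD j false ∈ VB := by
          rw [List.getD_eq_getElem?_getD, List.getElem?_eq_getElem (by omega : j < VB.length)]
          exact List.getElem_mem _
        exact (hall _ this).symm
  -- A marks every reachable index
  have hAreach : ∀ j, Good j → VA.getD j false = true := by
    intro j hj
    induction hj with
    | refl => exact a2 1 hv1one
    | @tail k j hk hadj ih => exact a4 k j ih (by rw [hAdjeq]; exact hadj)
  -- the two visit lists agree
  refine ⟨list_bool_ext (a1.trans b1.symm) ?_, b1⟩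
  intro j
  cases hva : VA.getD j false with
  | true => exact (hBreach j (a3 j hva)).symm
  | false =>
    cases hvb : VB.getD j false with
    | true => rw [← hva, hAreach j (b3 j hvb)]
    | false => rfl

-- ===== VERDICT (by name: the statement is the Claim_ definition above) =====
theorem bfs_spec : Claim_equal_bfs := by
  unfold Claim_equal_bfs Spec_bfs
  intro cut n wires _ hpre
  obtain ⟨hn, hpw⟩ := hpre
  obtain ⟨hveq, hlen⟩ := visit_eq cut n wires hn hpw
  unfold bfs bfs_alt
  dsimp only
  rw [hveq]
  set VB := loopB (((PySem.List.enumerate wires 0).filter (fun p => p.1 != cut)).map (·.2)) n.toNat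
    (PySem.List.pySetD (List.replicate (n + 1).toNat false) 1 true) with hVB
  rw [tally_eq VB n hn hlen, PySem.List.slice_from_one, ← List.drop_one]
  have hcc := count_true_add_count_false (VB.drop 1)
  have hdlen : (VB.drop 1).length = (n + 1).toNat - 1 := by simp [hlen]
  omega
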